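-- pv_equiv track=rewrite | github.com/gpb360/AI-Marketing-Web-Builder | backend/app/services/component_suggestion_service.py | _identify_user_journey_gaps
-- ===== SOURCE A (Python) =====
-- from typing import List, Dict, Any, Optional, Tuple
--
-- def _identify_user_journey_gaps(current_types: List[str], goals: List[str]) -> List[str]:
--     """Identify gaps in the user journey based on current components and goals."""
--     gaps = []
--
--     # Check for trust building elements
--     trust_components = ['testimonials', 'reviews', 'certifications', 'security-badges']
--     if not any(comp in current_types for comp in trust_components):
--         gaps.append('trust_building')
--
--     # Check for engagement elements
--     engagement_components = ['interactive-demo', 'calculator', 'quiz', 'video']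
--     if not any(comp in current_types for comp in engagement_components):
--         gaps.append('engagement')
--
--     # Check for conversion elements
--     conversion_components = ['cta', 'contact-form', 'pricing', 'signup']
--     if not any(comp in current_types for comp in conversion_components):
--         gaps.append('conversion')
--
--     # Goal-specific gaps
--     if 'lead_generation' in goals:
--         lead_components = ['lead-magnet', 'newsletter-signup', 'contact-form']
--         if not any(comp in current_types for comp in lead_components):
--             gaps.append('lead_capture')
--
--     return gaps
-- ===== SOURCE B (Python) =====
-- from typing import List, Dict
--
-- # Inverted index: each known component name -> the gap categories it covers.
-- _COVERS: Dict[str, List[str]] = {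
--     'testimonials': ['trust_building'],
--     'reviews': ['trust_building'],
--     'certifications': ['trust_building'],
--     'security-badges': ['trust_building'],
--     'interactive-demo': ['engagement'],
--     'calculator': ['engagement'],
--     'quiz': ['engagement'],
--     'video': ['engagement'],
--     'cta': ['conversion'],
--     'contact-form': ['conversion', 'lead_capture'],
--     'pricing': ['conversion'],
--     'signup': ['conversion'],
--     'lead-magnet': ['lead_capture'],
--     'newsletter-signup': ['lead_capture'],
-- }
--
-- def _identify_user_journey_gaps(current_types: List[str], goals: List[str]) -> List[str]:
--     covered = set()
--     for t in current_types:
--         covered.update(_COVERS.get(t, []))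
--     wanted = ['trust_building', 'engagement', 'conversion']
--     if 'lead_generation' in goals:
--         wanted.append('lead_capture')
--     return [g for g in wanted if g not in covered]
-- ===== Notes on version B (the rewrite author's own statement) =====
-- stated objective: alternative
-- what changed: Inverted the traversal: instead of testing each of A's four component groups against current_types, B makes one pass over current_types through an inverted component-to-categories index, accumulates the set of covered categories, and then emits the uncovered labels in fixed order (lead_capture only when the goal is present).
import Mathlib
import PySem

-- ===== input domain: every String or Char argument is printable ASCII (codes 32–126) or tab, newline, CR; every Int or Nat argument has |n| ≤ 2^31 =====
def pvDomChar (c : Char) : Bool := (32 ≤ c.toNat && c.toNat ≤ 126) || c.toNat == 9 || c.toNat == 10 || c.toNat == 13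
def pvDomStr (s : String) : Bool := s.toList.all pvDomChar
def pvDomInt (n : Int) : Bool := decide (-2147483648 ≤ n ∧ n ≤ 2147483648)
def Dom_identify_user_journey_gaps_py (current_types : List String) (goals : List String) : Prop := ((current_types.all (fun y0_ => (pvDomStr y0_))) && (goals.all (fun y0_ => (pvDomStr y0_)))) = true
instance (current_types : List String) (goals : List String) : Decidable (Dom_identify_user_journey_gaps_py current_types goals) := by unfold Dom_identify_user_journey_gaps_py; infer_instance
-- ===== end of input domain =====

-- B inverts the traversal: one pass over current_types through a component→categories index accumulating covered categories, then the uncovered labels in order (alternative decomposition; return value proved equal to A on all inputs).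


-- ===== PORT A =====
def identify_user_journey_gaps_py (current_types : List String) (goals : List String) : List String :=
  -- gaps = []
  let gaps : List String := []
  -- trust building
  let trust_components := ["testimonials", "reviews", "certifications", "security-badges"]
  let gaps := if !(trust_components.any (fun comp => current_types.contains comp)) then gaps ++ ["trust_building"] else gaps
  -- engagement
  let engagement_components := ["interactive-demo", "calculator", "quiz", "video"]
  let gaps := if !(engagement_components.any (fun comp => current_types.contains comp)) then gaps ++ ["engagement"] else gaps
  -- conversion
  let conversion_components := ["cta", "contact-form", "pricing", "signup"]
  let gaps := if !(conversion_components.any (fun comp => current_types.contains comp)) then gaps ++ ["conversion"] else gaps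
  -- goal-specific
  let gaps := if goals.contains "lead_generation" then
      let lead_components := ["lead-magnet", "newsletter-signup", "contact-form"]
      if !(lead_components.any (fun comp => current_types.contains comp)) then gaps ++ ["lead_capture"] else gaps
    else gaps
  gaps

-- ===== PORT B =====
-- B-side: inverted index, component name → categories it covers (Python module constant _COVERS)
def coversDict : PySem.Dict String (List String) := PySem.Dict.mk
  [("testimonials", ["trust_building"]), ("reviews", ["trust_building"]),
   ("certifications", ["trust_building"]), ("security-badges", ["trust_building"]),
   ("interactive-demo", ["engagement"]), ("calculator", ["engagement"]),
   ("quiz", ["engagement"]), ("video", ["engagement"]),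
   ("cta", ["conversion"]), ("contact-form", ["conversion", "lead_capture"]),
   ("pricing", ["conversion"]), ("signup", ["conversion"]),
   ("lead-magnet", ["lead_capture"]), ("newsletter-signup", ["lead_capture"])]

def identify_user_journey_gaps_py_alt (current_types : List String) (goals : List String) : List String :=
  -- covered = set(); for t in current_types: covered.update(_COVERS.get(t, []))
  let covered : PySem.Set String :=
    current_types.foldl (fun s t => PySem.Set.update s (PySem.Dict.getD coversDict t [])) PySem.Set.empty
  -- wanted = [...]; append lead_capture when the goal is present
  let wanted := ["trust_building", "engagement", "conversion"]
  let wanted := if goals.contains "lead_generation" then wanted ++ ["lead_capture"] else wanted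
  wanted.filter (fun g => !(PySem.Set.contains covered g))

-- ===== PRECONDITION & SPEC =====
def Spec_identify_user_journey_gaps_py (current_types : List String) (goals : List String) (out : List String) : Prop := out = identify_user_journey_gaps_py_alt current_types goals
instance (current_types : List String) (goals : List String) (out : List String) : Decidable (Spec_identify_user_journey_gaps_py current_types goals out) := by unfold Spec_identify_user_journey_gaps_py; infer_instance

-- ===== CLAIM (what is proved, stated in full; the proofs are below) =====
def Claim_equal_identify_user_journey_gaps_py : Prop := ∀ (current_types : List String) (goals : List String), Dom_identify_user_journey_gaps_py current_types goals → Spec_identify_user_journey_gaps_py current_types goals (identify_user_journey_gaps_py current_types goals)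

-- ===== LEMMAS AND PROOFS =====

-- membership in the covered-set fold: y is covered iff some scanned type maps to it
theorem mem_covered_fold (types : List String) (init : PySem.Set String) (y : String) :
    (y ∈ types.foldl (fun s t => PySem.Set.update s (PySem.Dict.getD coversDict t [])) init)
      ↔ (y ∈ init ∨ ∃ t ∈ types, y ∈ PySem.Dict.getD coversDict t []) := by
  induction types generalizing init with
  | nil => simp [List.foldl]
  | cons t ts ih =>
    simp only [List.foldl_cons, ih, PySem.Set.mem_update, List.mem_cons]
    constructor
    · rintro (((h | h) | ⟨u, hu, hy⟩))
      · exact Or.inl h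
      · exact Or.inr ⟨t, Or.inl rfl, h⟩
      · exact Or.inr ⟨u, Or.inr hu, hy⟩
    · rintro (h | ⟨u, (rfl | hu), hy⟩)
      · exact Or.inl (Or.inl h)
      · exact Or.inl (Or.inr hy)
      · exact Or.inr ⟨u, hu, hy⟩

-- pointwise characterisation of the inverted index: which keys map to each label
theorem covers_trust (t : String) :
    ("trust_building" ∈ PySem.Dict.getD coversDict t [])
      ↔ t ∈ ["testimonials", "reviews", "certifications", "security-badges"] := by
  rw [PySem.Dict.getD_eq_get?_getD]
  unfold coversDict
  rw [PySem.Dict.get?_mk_cons, PySem.Dict.get?_mk_cons, PySem.Dict.get?_mk_cons, PySem.Dict.get?_mk_cons, PySem.Dict.get?_mk_cons, PySem.Dict.get?_mk_cons, PySem.Dict.get?_mk_cons, PySem.Dict.get?_mk_cons, PySem.Dict.get?_mk_cons, PySem.Dict.get?_mk_cons, PySem.Dict.get?_mk_cons, PySem.Dict.get?_mk_cons, PySem.Dict.get?_mk_cons, PySem.Dict.get?_mk_cons]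
  by_cases h1 : (("testimonials" : String) == t) = true
  · rw [if_pos h1, ← eq_of_beq h1]; decide
  rw [if_neg h1]
  by_cases h2 : (("reviews" : String) == t) = true
  · rw [if_pos h2, ← eq_of_beq h2]; decide
  rw [if_neg h2]
  by_cases h3 : (("certifications" : String) == t) = true
  · rw [if_pos h3, ← eq_of_beq h3]; decide
  rw [if_neg h3]
  by_cases h4 : (("security-badges" : String) == t) = true
  · rw [if_pos h4, ← eq_of_beq h4]; decide
  rw [if_neg h4]
  by_cases h5 : (("interactive-demo" : String) == t) = true
  · rw [if_pos h5, ← eq_of_beq h5]; decide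
  rw [if_neg h5]
  by_cases h6 : (("calculator" : String) == t) = true
  · rw [if_pos h6, ← eq_of_beq h6]; decide
  rw [if_neg h6]
  by_cases h7 : (("quiz" : String) == t) = true
  · rw [if_pos h7, ← eq_of_beq h7]; decide
  rw [if_neg h7]
  by_cases h8 : (("video" : String) == t) = true
  · rw [if_pos h8, ← eq_of_beq h8]; decide
  rw [if_neg h8]
  by_cases h9 : (("cta" : String) == t) = true
  · rw [if_pos h9, ← eq_of_beq h9]; decide
  rw [if_neg h9]
  by_cases h10 : (("contact-form" : String) == t) = true
  · rw [if_pos h10, ← eq_of_beq h10]; decide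
  rw [if_neg h10]
  by_cases h11 : (("pricing" : String) == t) = true
  · rw [if_pos h11, ← eq_of_beq h11]; decide
  rw [if_neg h11]
  by_cases h12 : (("signup" : String) == t) = true
  · rw [if_pos h12, ← eq_of_beq h12]; decide
  rw [if_neg h12]
  by_cases h13 : (("lead-magnet" : String) == t) = true
  · rw [if_pos h13, ← eq_of_beq h13]; decide
  rw [if_neg h13]
  by_cases h14 : (("newsletter-signup" : String) == t) = true
  · rw [if_pos h14, ← eq_of_beq h14]; decide
  rw [if_neg h14]
  simp only [PySem.Dict.get?, List.find?_nil, Option.map_none, Option.getD_none, List.not_mem_nil, false_iff, List.mem_cons, or_false]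
  rintro (rfl | rfl | rfl | rfl)
  · exact h1 (by decide)
  · exact h2 (by decide)
  · exact h3 (by decide)
  · exact h4 (by decide)

theorem covers_engagement (t : String) :
    ("engagement" ∈ PySem.Dict.getD coversDict t [])
      ↔ t ∈ ["interactive-demo", "calculator", "quiz", "video"] := by
  rw [PySem.Dict.getD_eq_get?_getD]
  unfold coversDict
  rw [PySem.Dict.get?_mk_cons, PySem.Dict.get?_mk_cons, PySem.Dict.get?_mk_cons, PySem.Dict.get?_mk_cons, PySem.Dict.get?_mk_cons, PySem.Dict.get?_mk_cons, PySem.Dict.get?_mk_cons, PySem.Dict.get?_mk_cons, PySem.Dict.get?_mk_cons, PySem.Dict.get?_mk_cons, PySem.Dict.get?_mk_cons, PySem.Dict.get?_mk_cons, PySem.Dict.get?_mk_cons, PySem.Dict.get?_mk_cons]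
  by_cases h1 : (("testimonials" : String) == t) = true
  · rw [if_pos h1, ← eq_of_beq h1]; decide
  rw [if_neg h1]
  by_cases h2 : (("reviews" : String) == t) = true
  · rw [if_pos h2, ← eq_of_beq h2]; decide
  rw [if_neg h2]
  by_cases h3 : (("certifications" : String) == t) = true
  · rw [if_pos h3, ← eq_of_beq h3]; decide
  rw [if_neg h3]
  by_cases h4 : (("security-badges" : String) == t) = true
  · rw [if_pos h4, ← eq_of_beq h4]; decide
  rw [if_neg h4]
  by_cases h5 : (("interactive-demo" : String) == t) = true
  · rw [if_pos h5, ← eq_of_beq h5]; decide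
  rw [if_neg h5]
  by_cases h6 : (("calculator" : String) == t) = true
  · rw [if_pos h6, ← eq_of_beq h6]; decide
  rw [if_neg h6]
  by_cases h7 : (("quiz" : String) == t) = true
  · rw [if_pos h7, ← eq_of_beq h7]; decide
  rw [if_neg h7]
  by_cases h8 : (("video" : String) == t) = true
  · rw [if_pos h8, ← eq_of_beq h8]; decide
  rw [if_neg h8]
  by_cases h9 : (("cta" : String) == t) = true
  · rw [if_pos h9, ← eq_of_beq h9]; decide
  rw [if_neg h9]
  by_cases h10 : (("contact-form" : String) == t) = true
  · rw [if_pos h10, ← eq_of_beq h10]; decide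
  rw [if_neg h10]
  by_cases h11 : (("pricing" : String) == t) = true
  · rw [if_pos h11, ← eq_of_beq h11]; decide
  rw [if_neg h11]
  by_cases h12 : (("signup" : String) == t) = true
  · rw [if_pos h12, ← eq_of_beq h12]; decide
  rw [if_neg h12]
  by_cases h13 : (("lead-magnet" : String) == t) = true
  · rw [if_pos h13, ← eq_of_beq h13]; decide
  rw [if_neg h13]
  by_cases h14 : (("newsletter-signup" : String) == t) = true
  · rw [if_pos h14, ← eq_of_beq h14]; decide
  rw [if_neg h14]
  simp only [PySem.Dict.get?, List.find?_nil, Option.map_none, Option.getD_none, List.not_mem_nil, false_iff, List.mem_cons, or_false]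
  rintro (rfl | rfl | rfl | rfl)
  · exact h5 (by decide)
  · exact h6 (by decide)
  · exact h7 (by decide)
  · exact h8 (by decide)

theorem covers_conversion (t : String) :
    ("conversion" ∈ PySem.Dict.getD coversDict t [])
      ↔ t ∈ ["cta", "contact-form", "pricing", "signup"] := by
  rw [PySem.Dict.getD_eq_get?_getD]
  unfold coversDict
  rw [PySem.Dict.get?_mk_cons, PySem.Dict.get?_mk_cons, PySem.Dict.get?_mk_cons, PySem.Dict.get?_mk_cons, PySem.Dict.get?_mk_cons, PySem.Dict.get?_mk_cons, PySem.Dict.get?_mk_cons, PySem.Dict.get?_mk_cons, PySem.Dict.get?_mk_cons, PySem.Dict.get?_mk_cons, PySem.Dict.get?_mk_cons, PySem.Dict.get?_mk_cons, PySem.Dict.get?_mk_cons, PySem.Dict.get?_mk_cons]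
  by_cases h1 : (("testimonials" : String) == t) = true
  · rw [if_pos h1, ← eq_of_beq h1]; decide
  rw [if_neg h1]
  by_cases h2 : (("reviews" : String) == t) = true
  · rw [if_pos h2, ← eq_of_beq h2]; decide
  rw [if_neg h2]
  by_cases h3 : (("certifications" : String) == t) = true
  · rw [if_pos h3, ← eq_of_beq h3]; decide
  rw [if_neg h3]
  by_cases h4 : (("security-badges" : String) == t) = true
  · rw [if_pos h4, ← eq_of_beq h4]; decide
  rw [if_neg h4]
  by_cases h5 : (("interactive-demo" : String) == t) = true
  · rw [if_pos h5, ← eq_of_beq h5]; decide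
  rw [if_neg h5]
  by_cases h6 : (("calculator" : String) == t) = true
  · rw [if_pos h6, ← eq_of_beq h6]; decide
  rw [if_neg h6]
  by_cases h7 : (("quiz" : String) == t) = true
  · rw [if_pos h7, ← eq_of_beq h7]; decide
  rw [if_neg h7]
  by_cases h8 : (("video" : String) == t) = true
  · rw [if_pos h8, ← eq_of_beq h8]; decide
  rw [if_neg h8]
  by_cases h9 : (("cta" : String) == t) = true
  · rw [if_pos h9, ← eq_of_beq h9]; decide
  rw [if_neg h9]
  by_cases h10 : (("contact-form" : String) == t) = true
  · rw [if_pos h10, ← eq_of_beq h10]; decide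
  rw [if_neg h10]
  by_cases h11 : (("pricing" : String) == t) = true
  · rw [if_pos h11, ← eq_of_beq h11]; decide
  rw [if_neg h11]
  by_cases h12 : (("signup" : String) == t) = true
  · rw [if_pos h12, ← eq_of_beq h12]; decide
  rw [if_neg h12]
  by_cases h13 : (("lead-magnet" : String) == t) = true
  · rw [if_pos h13, ← eq_of_beq h13]; decide
  rw [if_neg h13]
  by_cases h14 : (("newsletter-signup" : String) == t) = true
  · rw [if_pos h14, ← eq_of_beq h14]; decide
  rw [if_neg h14]
  simp only [PySem.Dict.get?, List.find?_nil, Option.map_none, Option.getD_none, List.not_mem_nil, false_iff, List.mem_cons, or_false]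
  rintro (rfl | rfl | rfl | rfl)
  · exact h9 (by decide)
  · exact h10 (by decide)
  · exact h11 (by decide)
  · exact h12 (by decide)

theorem covers_lead (t : String) :
    ("lead_capture" ∈ PySem.Dict.getD coversDict t [])
      ↔ t ∈ ["lead-magnet", "newsletter-signup", "contact-form"] := by
  rw [PySem.Dict.getD_eq_get?_getD]
  unfold coversDict
  rw [PySem.Dict.get?_mk_cons, PySem.Dict.get?_mk_cons, PySem.Dict.get?_mk_cons, PySem.Dict.get?_mk_cons, PySem.Dict.get?_mk_cons, PySem.Dict.get?_mk_cons, PySem.Dict.get?_mk_cons, PySem.Dict.get?_mk_cons, PySem.Dict.get?_mk_cons, PySem.Dict.get?_mk_cons, PySem.Dict.get?_mk_cons, PySem.Dict.get?_mk_cons, PySem.Dict.get?_mk_cons, PySem.Dict.get?_mk_cons]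
  by_cases h1 : (("testimonials" : String) == t) = true
  · rw [if_pos h1, ← eq_of_beq h1]; decide
  rw [if_neg h1]
  by_cases h2 : (("reviews" : String) == t) = true
  · rw [if_pos h2, ← eq_of_beq h2]; decide
  rw [if_neg h2]
  by_cases h3 : (("certifications" : String) == t) = true
  · rw [if_pos h3, ← eq_of_beq h3]; decide
  rw [if_neg h3]
  by_cases h4 : (("security-badges" : String) == t) = true
  · rw [if_pos h4, ← eq_of_beq h4]; decide
  rw [if_neg h4]
  by_cases h5 : (("interactive-demo" : String) == t) = true
  · rw [if_pos h5, ← eq_of_beq h5]; decide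
  rw [if_neg h5]
  by_cases h6 : (("calculator" : String) == t) = true
  · rw [if_pos h6, ← eq_of_beq h6]; decide
  rw [if_neg h6]
  by_cases h7 : (("quiz" : String) == t) = true
  · rw [if_pos h7, ← eq_of_beq h7]; decide
  rw [if_neg h7]
  by_cases h8 : (("video" : String) == t) = true
  · rw [if_pos h8, ← eq_of_beq h8]; decide
  rw [if_neg h8]
  by_cases h9 : (("cta" : String) == t) = true
  · rw [if_pos h9, ← eq_of_beq h9]; decide
  rw [if_neg h9]
  by_cases h10 : (("contact-form" : String) == t) = true
  · rw [if_pos h10, ← eq_of_beq h10]; decide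
  rw [if_neg h10]
  by_cases h11 : (("pricing" : String) == t) = true
  · rw [if_pos h11, ← eq_of_beq h11]; decide
  rw [if_neg h11]
  by_cases h12 : (("signup" : String) == t) = true
  · rw [if_pos h12, ← eq_of_beq h12]; decide
  rw [if_neg h12]
  by_cases h13 : (("lead-magnet" : String) == t) = true
  · rw [if_pos h13, ← eq_of_beq h13]; decide
  rw [if_neg h13]
  by_cases h14 : (("newsletter-signup" : String) == t) = true
  · rw [if_pos h14, ← eq_of_beq h14]; decide
  rw [if_neg h14]
  simp only [PySem.Dict.get?, List.find?_nil, Option.map_none, Option.getD_none, List.not_mem_nil, false_iff, List.mem_cons, or_false]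
  rintro (rfl | rfl | rfl)
  · exact h13 (by decide)
  · exact h14 (by decide)
  · exact h10 (by decide)

-- covered-set membership at each label equals A's group check
theorem mem_covered (types : List String) (lbl : String) (comps : List String)
    (hc : ∀ t, (lbl ∈ PySem.Dict.getD coversDict t []) ↔ t ∈ comps) :
    (lbl ∈ types.foldl (fun s t => PySem.Set.update s (PySem.Dict.getD coversDict t [])) PySem.Set.empty)
      ↔ (comps.any (fun comp => types.contains comp) = true) := by
  rw [mem_covered_fold]
  simp only [PySem.Set.empty, List.not_mem_nil, false_or, List.any_eq_true]
  constructor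
  · rintro ⟨t, ht, hy⟩
    exact ⟨t, (hc t).mp hy, by simpa using ht⟩
  · rintro ⟨c, hcmem, hct⟩
    exact ⟨c, by simpa using hct, (hc c).mpr hcmem⟩

-- ===== VERDICT (by name: the statement is the Claim_ definition above) =====
set_option maxHeartbeats 2000000 in
theorem identify_user_journey_gaps_py_spec : Claim_equal_identify_user_journey_gaps_py := by
  intro current_types goals _
  unfold Spec_identify_user_journey_gaps_py
  unfold identify_user_journey_gaps_py identify_user_journey_gaps_py_alt
  have m1 := mem_covered current_types "trust_building" _ covers_trust
  have m2 := mem_covered current_types "engagement" _ covers_engagement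
  have m3 := mem_covered current_types "conversion" _ covers_conversion
  have m4 := mem_covered current_types "lead_capture" _ covers_lead
  cases h1 : (["testimonials", "reviews", "certifications", "security-badges"].any
      (fun comp => current_types.contains comp)) <;>
  cases h2 : (["interactive-demo", "calculator", "quiz", "video"].any
      (fun comp => current_types.contains comp)) <;>
  cases h3 : (["cta", "contact-form", "pricing", "signup"].any
      (fun comp => current_types.contains comp)) <;>
  cases h4 : goals.contains "lead_generation" <;>
  cases h5 : (["lead-magnet", "newsletter-signup", "contact-form"].any
      (fun comp => current_types.contains comp)) <;>
  simp_all [List.filter_cons, List.filter_nil] <;> (try split_ifs <;> simp_all) <;> tauto
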